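-- pv_equiv track=rewrite | github.com/every-algorithm/python | cryptography/bifid_cipher.py | create_polybius_square
-- ===== SOURCE A (Python) =====
-- def create_polybius_square(key):
--     # Build a 5x5 square from the key and the remaining alphabet
--     square = []
--     used = set()
--     for ch in key.upper():
--         if ch.isalpha() and ch not in used:
--             used.add(ch)
--             square.append(ch)
--     for ch in "ABCDEFGHIKLMNOPQRSTUVWXYZ":  # J is omitted
--         if ch not in used:
--             used.add(ch)
--             square.append(ch)
--     return square
-- ===== SOURCE B (Python) =====
-- def create_polybius_square(key):
--     # Rank-and-sort: every candidate letter gets a numeric priority (first position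
--     # in the key, or key length + alphabet position), then one sort emits the square.
--     letters = [ch for ch in key.upper() if ch.isalpha()]
--     alphabet = "ABCDEFGHIKLMNOPQRSTUVWXYZ"
--
--     def rank(ch):
--         return letters.index(ch) if ch in letters else len(letters) + alphabet.index(ch)
--
--     return sorted(set(letters) | set(alphabet), key=rank)
-- ===== Notes on version B (the rewrite author's own statement) =====
-- stated objective: alternative
-- what changed: Replaces A's incremental dedup (a used-set with membership-guarded appends over two loops) by a rank-and-sort algorithm: each candidate letter gets a numeric priority (first position in the key, else key length plus alphabet position) and one sort of the candidate set emits the square.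
import Mathlib
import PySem

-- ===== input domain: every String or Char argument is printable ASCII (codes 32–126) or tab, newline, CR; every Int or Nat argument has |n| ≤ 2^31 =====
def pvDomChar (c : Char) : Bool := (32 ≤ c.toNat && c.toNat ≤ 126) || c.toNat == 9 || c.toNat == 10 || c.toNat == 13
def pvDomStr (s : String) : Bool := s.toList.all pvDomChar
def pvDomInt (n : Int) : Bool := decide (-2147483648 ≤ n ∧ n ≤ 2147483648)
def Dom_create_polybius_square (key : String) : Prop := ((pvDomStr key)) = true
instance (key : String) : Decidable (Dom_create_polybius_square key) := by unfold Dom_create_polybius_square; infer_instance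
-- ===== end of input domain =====

-- B replaces A's incremental dedup (used-set with guarded appends over two loops) by a
-- rank-and-sort algorithm: each candidate letter gets a numeric priority and one sort
-- of the candidate set emits the square (objective: alternative).


-- ===== PORT A =====
-- first loop body: 'if ch.isalpha() and ch not in used: used.add(ch); square.append(ch)'
def pvStepKey (st : List String × PySem.Set String) (ch : Char) : List String × PySem.Set String :=
  if PySem.Chars.isalpha ch && !(PySem.Set.contains st.2 (String.ofList [ch])) then
    (st.1 ++ [String.ofList [ch]], PySem.Set.add st.2 (String.ofList [ch]))
  else st

-- second loop body: 'if ch not in used: used.add(ch); square.append(ch)'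
def pvStepAlpha (st : List String × PySem.Set String) (ch : Char) : List String × PySem.Set String :=
  if !(PySem.Set.contains st.2 (String.ofList [ch])) then
    (st.1 ++ [String.ofList [ch]], PySem.Set.add st.2 (String.ofList [ch]))
  else st

def create_polybius_square (key : String) : List String :=
  let st1 := (PySem.Str.upper key).toList.foldl pvStepKey ([], PySem.Set.empty)
  let st2 := "ABCDEFGHIKLMNOPQRSTUVWXYZ".toList.foldl pvStepAlpha st1
  st2.1

-- ===== PORT B =====
-- 'letters = [ch for ch in key.upper() if ch.isalpha()]'
def pvLetters (key : String) : List String :=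
  ((PySem.Str.upper key).toList.filter PySem.Chars.isalpha).map (fun c => String.ofList [c])

-- 'alphabet = "ABCDEFGHIKLMNOPQRSTUVWXYZ"'  (as a sequence of 1-char strings)
def pvAlphabet : List String := "ABCDEFGHIKLMNOPQRSTUVWXYZ".toList.map (fun c => String.ofList [c])

-- 'def rank(ch): return letters.index(ch) if ch in letters else len(letters) + alphabet.index(ch)'
-- (.index is guarded by the membership test in Python, so the Option never is none on the taken branch)
def pvRank (letters : List String) (ch : String) : Nat :=
  if letters.contains ch then (PySem.List.index? letters ch).getD 0
  else letters.length + (PySem.List.index? pvAlphabet ch).getD 0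

-- 'return sorted(set(letters) | set(alphabet), key=rank)'
def create_polybius_square_alt (key : String) : List String :=
  PySem.List.sorted
    (PySem.Set.union (PySem.Set.ofList (pvLetters key)) (PySem.Set.ofList pvAlphabet))
    (pvRank (pvLetters key)) false

-- ===== PRECONDITION & SPEC =====
def Spec_create_polybius_square (key : String) (out : List String) : Prop := out = create_polybius_square_alt key
instance (key : String) (out : List String) : Decidable (Spec_create_polybius_square key out) := by unfold Spec_create_polybius_square; infer_instance

-- ===== CLAIM (what is proved, stated in full; the proofs are below) =====
def Claim_equal_create_polybius_square : Prop := ∀ (key : String), Dom_create_polybius_square key → Spec_create_polybius_square key (create_polybius_square key)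

-- ===== LEMMAS AND PROOFS =====

-- A's first loop, run from a state whose square equals its used-set as a list,
-- is the Set.update of that state by the filtered, stringified characters.
theorem pv_loopKey_eq (cs : List Char) (s : PySem.Set String) :
    cs.foldl pvStepKey (s, s)
      = (PySem.Set.update s ((cs.filter PySem.Chars.isalpha).map (fun c => String.ofList [c])),
         PySem.Set.update s ((cs.filter PySem.Chars.isalpha).map (fun c => String.ofList [c]))) := by
  induction cs generalizing s with
  | nil => simp [PySem.Set.update]
  | cons c cs ih =>
    simp only [List.foldl_cons, List.filter_cons]
    by_cases ha : PySem.Chars.isalpha c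
    · by_cases hm : String.ofList [c] ∈ s
      · have h1 : pvStepKey (s, s) c = (s, s) := by
          simp [pvStepKey, ha, hm]
        rw [h1, ih]
        simp [ha, PySem.Set.update_cons, PySem.Set.add_of_mem hm]
      · have h1 : pvStepKey (s, s) c = (s ++ [String.ofList [c]], s ++ [String.ofList [c]]) := by
          simp [pvStepKey, ha, hm]
        rw [h1, ih]
        simp [ha, PySem.Set.update_cons, PySem.Set.add_of_not_mem hm]
    · have h1 : pvStepKey (s, s) c = (s, s) := by simp [pvStepKey, ha]
      rw [h1, ih]
      simp [ha]

-- Same for A's second loop (no isalpha guard).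
theorem pv_loopAlpha_eq (cs : List Char) (s : PySem.Set String) :
    cs.foldl pvStepAlpha (s, s)
      = (PySem.Set.update s (cs.map (fun c => String.ofList [c])),
         PySem.Set.update s (cs.map (fun c => String.ofList [c]))) := by
  induction cs generalizing s with
  | nil => simp [PySem.Set.update]
  | cons c cs ih =>
    simp only [List.foldl_cons, List.map_cons]
    by_cases hm : String.ofList [c] ∈ s
    · have h1 : pvStepAlpha (s, s) c = (s, s) := by
        simp [pvStepAlpha, hm]
      rw [h1, ih]
      simp [PySem.Set.update_cons, PySem.Set.add_of_mem hm]
    · have h1 : pvStepAlpha (s, s) c = (s ++ [String.ofList [c]], s ++ [String.ofList [c]]) := by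
        simp [pvStepAlpha, hm]
      rw [h1, ih]
      simp [PySem.Set.update_cons, PySem.Set.add_of_not_mem hm]

-- A's output is the update of the deduped key letters by the alphabet.
theorem pv_A_eq (key : String) :
    create_polybius_square key
      = PySem.Set.update (PySem.Set.ofList (pvLetters key)) pvAlphabet := by
  simp only [create_polybius_square, pvLetters, pvAlphabet]
  rw [show (([] : List String), (PySem.Set.empty : PySem.Set String))
        = ((PySem.Set.empty : PySem.Set String), (PySem.Set.empty : PySem.Set String)) from rfl,
      pv_loopKey_eq, pv_loopAlpha_eq]
  simp [PySem.Set.empty, PySem.Set.update_nil_left, PySem.Set.ofList]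

-- first-occurrence indices increase along set(xs)'s order
theorem pv_ofList_pairwise_idx {α : Type} [BEq α] [LawfulBEq α] (xs : List α) :
    (PySem.Set.ofList xs).Pairwise
      (fun a b => (PySem.List.index? xs a).getD 0 < (PySem.List.index? xs b).getD 0) := by
  induction xs using List.reverseRecOn with
  | nil => simp [PySem.Set.ofList]
  | append_singleton xs x ih =>
    have hof : PySem.Set.ofList (xs ++ [x]) = PySem.Set.add (PySem.Set.ofList xs) x := by
      simp [PySem.Set.ofList_eq_foldl, List.foldl_append]
    rw [hof]
    by_cases hx : x ∈ xs
    · have hmem : x ∈ PySem.Set.ofList xs := (PySem.Set.mem_ofList _ _).mpr hx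
      rw [PySem.Set.add_of_mem hmem]
      refine ih.imp_of_mem ?_
      intro a b ha hb h
      have ha' : a ∈ xs := (PySem.Set.mem_ofList _ _).mp ha
      have hb' : b ∈ xs := (PySem.Set.mem_ofList _ _).mp hb
      rwa [PySem.List.index?_append_of_mem _ ha', PySem.List.index?_append_of_mem _ hb']
    · have hmem : x ∉ PySem.Set.ofList xs := fun h => hx ((PySem.Set.mem_ofList _ _).mp h)
      rw [PySem.Set.add_of_not_mem hmem]
      rw [List.pairwise_append]
      refine ⟨?_, by simp, ?_⟩
      · refine ih.imp_of_mem ?_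
        intro a b ha hb h
        have ha' : a ∈ xs := (PySem.Set.mem_ofList _ _).mp ha
        have hb' : b ∈ xs := (PySem.Set.mem_ofList _ _).mp hb
        rwa [PySem.List.index?_append_of_mem _ ha', PySem.List.index?_append_of_mem _ hb']
      · intro a ha b hb
        have ha' : a ∈ xs := (PySem.Set.mem_ofList _ _).mp ha
        have hb' : b = x := by simpa using hb
        subst hb'
        rw [PySem.List.index?_append_of_mem _ ha', PySem.List.index?_append_singleton_self _ _ hx]
        have hs : (PySem.List.index? xs a).isSome := (PySem.List.index?_isSome_iff _ _).mpr ha'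
        obtain ⟨k, hk⟩ := Option.isSome_iff_exists.mp hs
        obtain ⟨hklt, -, -⟩ := PySem.List.getElem_of_index?_eq_some hk
        rw [hk]
        simpa using hklt

-- a member of xs has a first index below xs.length
theorem pv_idx_lt {α : Type} [BEq α] [LawfulBEq α] {xs : List α} {a : α} (ha : a ∈ xs) :
    (PySem.List.index? xs a).getD 0 < xs.length := by
  have hs : (PySem.List.index? xs a).isSome := (PySem.List.index?_isSome_iff _ _).mpr ha
  obtain ⟨k, hk⟩ := Option.isSome_iff_exists.mp hs
  obtain ⟨hklt, -, -⟩ := PySem.List.getElem_of_index?_eq_some hk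
  rw [hk]
  simpa using hklt

theorem pv_alphabet_nodup : pvAlphabet.Nodup := by decide

-- A's output is strictly increasing under B's rank
theorem pv_A_pairwise (key : String) :
    (create_polybius_square key).Pairwise
      (fun a b => pvRank (pvLetters key) a < pvRank (pvLetters key) b) := by
  rw [pv_A_eq, PySem.Set.update_eq_append_filter]
  have h1 : PySem.Set.ofList pvAlphabet = pvAlphabet :=
    PySem.Set.ofList_eq_self_of_nodup _ pv_alphabet_nodup
  rw [h1]
  set L := pvLetters key
  rw [List.pairwise_append]
  refine ⟨?_, ?_, ?_⟩
  · refine (pv_ofList_pairwise_idx L).imp_of_mem ?_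
    intro a b ha hb h
    have ha' : a ∈ L := (PySem.Set.mem_ofList _ _).mp ha
    have hb' : b ∈ L := (PySem.Set.mem_ofList _ _).mp hb
    simpa [pvRank, List.contains_iff_mem, ha', hb'] using h
  · have h2 := (pv_ofList_pairwise_idx pvAlphabet)
    rw [h1] at h2
    have h3 := h2.sublist
      (List.filter_sublist (p := fun y => !(PySem.Set.contains (PySem.Set.ofList L) y)))
    refine h3.imp_of_mem ?_
    intro a b ha hb h
    have ha' := List.of_mem_filter ha
    have hb' := List.of_mem_filter hb
    have hna : a ∉ L := by
      simpa [PySem.Set.mem_ofList] using ha'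
    have hnb : b ∉ L := by
      simpa [PySem.Set.mem_ofList] using hb'
    simp only [pvRank, List.contains_iff_mem]
    rw [if_neg (by simpa using hna), if_neg (by simpa using hnb)]
    omega
  · intro a ha b hb
    have ha' : a ∈ L := (PySem.Set.mem_ofList _ _).mp ha
    have hnb : b ∉ L := by
      simpa [PySem.Set.mem_ofList] using List.of_mem_filter hb
    simp only [pvRank, List.contains_iff_mem]
    rw [if_pos (by simpa using ha'), if_neg (by simpa using hnb)]
    have := pv_idx_lt ha'
    omega

-- A's output is a permutation of B's sort input
theorem pv_A_perm (key : String) :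
    (create_polybius_square key).Perm
      (PySem.Set.union (PySem.Set.ofList (pvLetters key)) (PySem.Set.ofList pvAlphabet)) := by
  rw [pv_A_eq]
  refine (List.perm_ext_iff_of_nodup ?_ ?_).mpr ?_
  · exact PySem.Set.nodup_update _ _ (PySem.Set.nodup_ofList _)
  · exact PySem.Set.nodup_union _ _ (PySem.Set.nodup_ofList _)
  · intro a
    simp [PySem.Set.mem_update, PySem.Set.mem_union, PySem.Set.mem_ofList]

-- ===== VERDICT (by name: the statement is the Claim_ definition above) =====
theorem create_polybius_square_spec : Claim_equal_create_polybius_square := by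
  intro key _
  unfold Spec_create_polybius_square
  rw [create_polybius_square_alt]
  exact (PySem.List.sorted_eq_of_perm_of_pairwise_lt _ _ _ (pv_A_perm key) (pv_A_pairwise key)).symm
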